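-- pv_equiv track=rewrite | github.com/dbgnvan2/trans-summary | pipeline.py | _sort_key_term_sections
-- ===== SOURCE A (Python) =====
-- def _sort_key_term_sections(content: str) -> str:
--     """Sort key term sections alphabetically by heading."""
--     sections = []
--     current = None
--     for line in content.splitlines():
--         if line.startswith('## '):
--             if current:
--                 sections.append(current)
--             current = {'title': line[3:].strip(), 'lines': [line]}
--         else:
--             if current is None:
--                 continue
--             current['lines'].append(line)
--     if current:
--         sections.append(current)
--
--     if not sections:
--         return content
--
--     sections.sort(key=lambda s: s['title'].lower())
--     return '\n'.join('\n'.join(section['lines']) for section in sections).strip()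
-- ===== SOURCE B (Python) =====
-- def _sort_key_term_sections(content: str) -> str:
--     """Sort key term sections alphabetically by heading."""
--     rest = content.splitlines()
--     # skip any preamble lines before the first '## ' heading
--     while rest and not rest[0].startswith('## '):
--         rest = rest[1:]
--     if not rest:
--         return content
--     secs = []
--     while rest:
--         head, rest = rest[0], rest[1:]
--         body = []
--         while rest and not rest[0].startswith('## '):
--             body.append(rest[0])
--             rest = rest[1:]
--         secs.append([head] + body)
--     secs.sort(key=lambda sec: sec[0][3:].strip().lower())
--     return '\n'.join('\n'.join(sec) for sec in secs).strip()
-- ===== Notes on version B (the rewrite author's own statement) =====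
-- stated objective: alternative
-- what changed: A's single dict-carrying state machine (sections/current accumulator) is replaced by a skip-the-preamble pass plus a grab-one-section-at-a-time two-level scan that cuts the line list into sections directly, then the same stable sort and join.
import Mathlib
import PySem

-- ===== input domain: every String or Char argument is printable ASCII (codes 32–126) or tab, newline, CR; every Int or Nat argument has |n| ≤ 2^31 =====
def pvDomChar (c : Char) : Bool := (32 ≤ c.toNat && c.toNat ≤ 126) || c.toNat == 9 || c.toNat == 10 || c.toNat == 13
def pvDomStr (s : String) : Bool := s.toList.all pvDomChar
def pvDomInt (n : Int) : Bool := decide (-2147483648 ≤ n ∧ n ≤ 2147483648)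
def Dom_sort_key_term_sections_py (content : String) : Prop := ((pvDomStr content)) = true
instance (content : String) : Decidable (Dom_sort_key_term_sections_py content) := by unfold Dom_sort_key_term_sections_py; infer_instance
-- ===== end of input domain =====

-- B replaces A's dict-carrying state machine by a skip-preamble + grab-a-section-at-a-time
-- recursive scan over the line list (objective: alternative decomposition, same cost).

-- line[3:].strip() — the section title, shared by both ports
def pvTitle (line : String) : String :=
  PySem.Str.strip (PySem.Str.slice line (some 3) none)

-- ===== PORT A =====
-- one step of A's for-loop: state = (sections, current)
def pvAStep (st : List (String × List String) × Option (String × List String)) (line : String) :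
    List (String × List String) × Option (String × List String) :=
  if PySem.Str.startswith line "## " then
    match st.2 with
    | some cur => (st.1 ++ [cur], some (pvTitle line, [line]))
    | none => (st.1, some (pvTitle line, [line]))
  else
    match st.2 with
    | none => st
    | some cur => (st.1, some (cur.1, cur.2 ++ [line]))

def sort_key_term_sections_py (content : String) : String :=
  let st := (PySem.Str.splitlines content).foldl pvAStep ([], none)
  let sections := st.1 ++ st.2.toList
  if sections = [] then content
  else
    let sections := PySem.List.sorted sections (fun s => PySem.Str.lower s.1) false
    PySem.Str.strip (PySem.Str.join "\n" (sections.map (fun s => PySem.Str.join "\n" s.2)))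

-- ===== PORT B =====
-- skip lines before the first '## ' heading
def pvSkipPre : List String → List String
  | [] => []
  | l :: ls => if PySem.Str.startswith l "## " then l :: ls else pvSkipPre ls

-- inner while loop: collect the body lines up to the next heading, return (body, rest)
def pvGrab : List String → List String × List String
  | [] => ([], [])
  | l :: ls =>
    if PySem.Str.startswith l "## " then ([], l :: ls)
    else
      let p := pvGrab ls
      (l :: p.1, p.2)

theorem pvGrab_snd_le (ls : List String) : (pvGrab ls).2.length ≤ ls.length := by
  induction ls with
  | nil => simp [pvGrab]
  | cons l ls ih =>
    simp only [pvGrab]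
    split
    · simp
    · simpa using Nat.le_succ_of_le ih

-- outer while loop: cut the (heading-first) line list into sections
def pvGroups : List String → List (List String)
  | [] => []
  | l :: ls =>
    (l :: (pvGrab ls).1) :: pvGroups (pvGrab ls).2
  termination_by ls => ls.length
  decreasing_by simpa using Nat.lt_succ_of_le (pvGrab_snd_le ls)

def sort_key_term_sections_py_alt (content : String) : String :=
  let rest := pvSkipPre (PySem.Str.splitlines content)
  if rest = [] then content
  else
    let secs := pvGroups rest
    let secs := PySem.List.sorted secs (fun sec => PySem.Str.lower (pvTitle (sec.headD ""))) false
    PySem.Str.strip (PySem.Str.join "\n" (secs.map (fun sec => PySem.Str.join "\n" sec)))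

-- ===== PRECONDITION & SPEC =====
def Spec_sort_key_term_sections_py (content : String) (out : String) : Prop := out = sort_key_term_sections_py_alt content
instance (content : String) (out : String) : Decidable (Spec_sort_key_term_sections_py content out) := by unfold Spec_sort_key_term_sections_py; infer_instance

-- ===== CLAIM (what is proved, stated in full; the proofs are below) =====
def Claim_equal_sort_key_term_sections_py : Prop := ∀ (content : String), Dom_sort_key_term_sections_py content → Spec_sort_key_term_sections_py content (sort_key_term_sections_py content)

-- ===== LEMMAS AND PROOFS =====

def pvTag (sec : List String) : String × List String := (pvTitle (sec.headD ""), sec)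

-- A skips lines until the first heading when current is None
theorem pvL1 (lines : List String) (acc : List (String × List String)) :
    lines.foldl pvAStep (acc, none) = (pvSkipPre lines).foldl pvAStep (acc, none) := by
  induction lines with
  | nil => rfl
  | cons l ls ih =>
    simp only [pvSkipPre, List.foldl_cons]
    by_cases h : PySem.Str.startswith l "## " = true
    · rw [if_pos h]
      simp only [pvAStep]
      rw [if_pos h, List.foldl_cons]
      simp only [pvAStep]
      rw [if_pos h]
    · rw [if_neg h]
      simp only [pvAStep]
      rw [if_neg h]
      exact ih

-- from an open section, A's fold produces the tagged groups
theorem pvL2 (lines : List String) (acc : List (String × List String)) (t : String) (cs : List String) :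
    (let r := lines.foldl pvAStep (acc, some (t, cs))
     r.1 ++ r.2.toList) =
    acc ++ (t, cs ++ (pvGrab lines).1) :: (pvGroups (pvGrab lines).2).map pvTag := by
  induction lines generalizing acc t cs with
  | nil =>
    rw [show pvGroups (pvGrab []).2 = [] from by rw [show (pvGrab ([] : List String)).2 = [] from rfl, pvGroups]]
    simp [pvGrab]
  | cons l ls ih =>
    by_cases h : PySem.Str.startswith l "## " = true
    · rw [show pvGrab (l :: ls) = ([], l :: ls) from by simp only [pvGrab]; rw [if_pos h]]
      simp only [List.foldl_cons, pvAStep]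
      rw [if_pos h]
      rw [show pvGroups (l :: ls) = (l :: (pvGrab ls).1) :: pvGroups (pvGrab ls).2 from by rw [pvGroups]]
      simpa [pvTag] using ih (acc ++ [(t, cs)]) (pvTitle l) [l]
    · rw [show pvGrab (l :: ls) = (l :: (pvGrab ls).1, (pvGrab ls).2) from by simp only [pvGrab]; rw [if_neg h]]
      simp only [List.foldl_cons, pvAStep]
      rw [if_neg h]
      simpa using ih acc t (cs ++ [l])

theorem pvSkipPre_head (lines : List String) (l : String) (ls : List String)
    (h : pvSkipPre lines = l :: ls) : PySem.Str.startswith l "## " = true := by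
  induction lines with
  | nil => simp [pvSkipPre] at h
  | cons x xs ih =>
    simp only [pvSkipPre] at h
    split at h
    · cases h; assumption
    · exact ih h

-- stability: sorting a mapped list = mapping the sorted list (key composed with the map)
theorem pvInsertBy_map {α β : Type} (f : α → β) (bf : β → β → Bool) (x : α) (acc : List α) :
    PySem.List.insertBy bf (f x) (acc.map f) =
      (PySem.List.insertBy (fun a b => bf (f a) (f b)) x acc).map f := by
  induction acc with
  | nil => simp [PySem.List.insertBy]
  | cons y ys ih => simp [PySem.List.insertBy, ih]; split <;> simp

theorem pvSorted_map {α β κ : Type} [LinearOrder κ] (f : α → β) (key : β → κ) (l : List α) :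
    PySem.List.sorted (l.map f) key false =
      (PySem.List.sorted l (fun a => key (f a)) false).map f := by
  rw [PySem.List.sorted_eq_foldl_insertBy, PySem.List.sorted_eq_foldl_insertBy]
  have : ∀ (acc : List α),
      (l.map f).foldl (fun acc x => PySem.List.insertBy (fun a b => decide (key a < key b)) x acc) (acc.map f) =
      (l.foldl (fun acc x => PySem.List.insertBy (fun a b => decide (key (f a) < key (f b))) x acc) acc).map f := by
    induction l with
    | nil => intro acc; simp
    | cons x xs ih => intro acc; simp only [List.map_cons, List.foldl_cons, pvInsertBy_map f _ x acc]; exact ih _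
  simpa using this []

-- A's section list equals B's tagged groups
theorem pvSections_eq (lines : List String) :
    (let st := lines.foldl pvAStep ([], none)
     st.1 ++ st.2.toList) = (pvGroups (pvSkipPre lines)).map pvTag := by
  rw [pvL1]
  cases hsp : pvSkipPre lines with
  | nil => rw [pvGroups]; simp
  | cons l ls =>
    have hl := pvSkipPre_head lines l ls hsp
    simp only [List.foldl_cons, pvAStep]
    rw [if_pos hl]
    rw [show pvGroups (l :: ls) = (l :: (pvGrab ls).1) :: pvGroups (pvGrab ls).2 from by rw [pvGroups]]
    simpa [pvTag] using pvL2 ls [] (pvTitle l) [l]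

-- ===== VERDICT (by name: the statement is the Claim_ definition above) =====
theorem sort_key_term_sections_py_spec : Claim_equal_sort_key_term_sections_py := by
  intro content _
  unfold Spec_sort_key_term_sections_py sort_key_term_sections_py sort_key_term_sections_py_alt
  have hs := pvSections_eq (PySem.Str.splitlines content)
  simp only at hs
  dsimp only
  rw [hs]
  cases hsp : pvSkipPre (PySem.Str.splitlines content) with
  | nil => rw [show pvGroups ([] : List String) = [] from by rw [pvGroups]]; simp
  | cons l ls =>
    have hne : pvGroups (l :: ls) ≠ [] := by
      rw [show pvGroups (l :: ls) = (l :: (pvGrab ls).1) :: pvGroups (pvGrab ls).2 from by rw [pvGroups]]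
      simp
    rw [if_neg (by simpa using hne), if_neg (by simp)]
    rw [pvSorted_map pvTag (fun s => PySem.Str.lower s.1) (pvGroups (l :: ls))]
    simp [pvTag, Function.comp_def]
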